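-- pv_equiv track=rewrite | github.com/tanacchi/practice | devotion/abc084_d.py | gen_2017_like
-- ===== SOURCE A (Python) =====
-- from copy import deepcopy
--
-- def gen_2017_like(limit):
--     p = [1 for _ in range(limit+1)]
--     p[0] = p[1] = 0
--
--     # prime?
--     for i in range(2, len(p)):
--         if not p[i]: continue
--         else:
--            for j in range(i*2, limit+1, i):
--                p[j] = 0
--
--     a = deepcopy(p)
--
--     # like 2017?
--     for i in range(len(a)):
--         target = int((i+1)/2)
--         if p[i] and p[target]:
--             continue
--         else:
--             a[i] = 0
--     return a
-- ===== SOURCE B (Python) =====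
-- def _is_prime(n):
--     if n < 2:
--         return False
--     d = 2
--     while d * d <= n:
--         if n % d == 0:
--             return False
--         d += 1
--     return True
--
--
-- def gen_2017_like(limit):
--     return [1 if _is_prime(i) and _is_prime((i + 1) // 2) else 0
--             for i in range(limit + 1)]
-- ===== Notes on version B (the rewrite author's own statement) =====
-- stated objective: simpler
-- what changed: Replaces the Eratosthenes sieve plus copy-and-patch second pass with a single list comprehension using a per-number trial-division is_prime helper applied to each index and to its rounded-down half of index+1.
-- outside the precondition, e.g. on gen_2017_like(0): A raises IndexError, B returns [0]; on gen_2017_like(-3): A raises IndexError, B returns []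
import Mathlib
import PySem

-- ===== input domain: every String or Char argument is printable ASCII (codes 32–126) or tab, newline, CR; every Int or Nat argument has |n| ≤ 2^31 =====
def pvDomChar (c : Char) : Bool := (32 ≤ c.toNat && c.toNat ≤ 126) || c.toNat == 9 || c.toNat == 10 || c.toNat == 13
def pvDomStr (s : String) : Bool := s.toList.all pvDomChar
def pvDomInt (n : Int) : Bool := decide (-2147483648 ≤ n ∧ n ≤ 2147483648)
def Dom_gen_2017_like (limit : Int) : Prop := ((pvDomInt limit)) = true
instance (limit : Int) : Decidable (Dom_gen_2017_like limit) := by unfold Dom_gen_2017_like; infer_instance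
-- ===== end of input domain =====

-- B replaces the sieve + copy-and-patch pass by one comprehension over a trial-division
-- is_prime helper (objective: simpler).  A raises IndexError for limit ≤ 0; Pre_ excludes those.

-- ===== PORT A =====
-- inner loop `for j in range(i*2, limit+1, i): p[j] = 0` (upper bound limit+1 = len(p));
-- the `0 < i` conjunct is a totality guard only (the loop is entered with i ≥ 2).
def pvMark (n i j : Nat) (p : List Int) : List Int :=
  if h : j < n ∧ 0 < i then pvMark n i (j + i) (p.set j 0) else p
  termination_by n - j
  decreasing_by omega

-- outer loop `for i in range(2, len(p))` with the `if not p[i]: continue` test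
def pvSieve (n i : Nat) (p : List Int) : List Int :=
  if h : i < n then
    pvSieve n (i + 1) (if p.getD i 0 ≠ 0 then pvMark n i (2 * i) p else p)
  else p
  termination_by n - i

-- second loop: `target = int((i+1)/2)` — for 0 ≤ i ≤ 2^31 the float division is exact,
-- so int((i+1)/2) = (i+1)//2 = Nat division (i+1)/2
def pvLike (p : List Int) (a : List Int) (i : Nat) : List Int :=
  if h : i < a.length then
    pvLike p (if p.getD i 0 ≠ 0 ∧ p.getD ((i + 1) / 2) 0 ≠ 0 then a else a.set i 0) (i + 1)
  else a
  termination_by a.length - i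
  decreasing_by
    split
    · omega
    · simp only [List.length_set]; omega

def gen_2017_like (limit : Int) : List Int :=
  let n := (limit + 1).toNat
  let p0 := ((List.replicate n (1 : Int)).set 0 0).set 1 0
  let p := pvSieve n 2 p0
  pvLike p p 0

-- ===== PORT B =====
-- `while d * d <= n: if n % d == 0: return False; d += 1` (the `0 < d` conjunct is a totality guard)
def pvIsPrimeAux (m d : Nat) : Bool :=
  if h : d * d ≤ m ∧ 0 < d then
    if m % d == 0 then false else pvIsPrimeAux m (d + 1)
  else true
  termination_by m + 1 - d
  decreasing_by
    rcases h with ⟨h1, h2⟩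
    have : d ≤ m := le_trans (Nat.le_mul_of_pos_left d h2) h1
    omega

def pvIsPrime (m : Nat) : Bool := if m < 2 then false else pvIsPrimeAux m 2

def gen_2017_like_alt (limit : Int) : List Int :=
  (List.range (limit + 1).toNat).map
    (fun i => if pvIsPrime i && pvIsPrime ((i + 1) / 2) then 1 else 0)

-- ===== PRECONDITION & SPEC =====
-- Pre_ excludes exactly limit ≤ 0, on which A raises IndexError (it assigns p[0] = p[1] = 0
-- in a list of length limit+1).
def Pre_gen_2017_like (limit : Int) : Prop := 1 ≤ limit
instance (limit : Int) : Decidable (Pre_gen_2017_like limit) := by unfold Pre_gen_2017_like; infer_instance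
def pvWitness_gen_2017_like : Int := (10)

def Spec_gen_2017_like (limit : Int) (out : List Int) : Prop := out = gen_2017_like_alt limit
instance (limit : Int) (out : List Int) : Decidable (Spec_gen_2017_like limit out) := by unfold Spec_gen_2017_like; infer_instance

-- ===== CLAIM (what is proved, stated in full; the proofs are below) =====
def Claim_equal_gen_2017_like : Prop := ∀ (limit : Int), Dom_gen_2017_like limit → Pre_gen_2017_like limit → Spec_gen_2017_like limit (gen_2017_like limit)
-- ===== LEMMAS AND PROOFS =====

theorem getD_set_zero (p : List Int) (j t : Nat) :
    (p.set j 0).getD t 0 = if t = j then 0 else p.getD t 0 := by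
  simp only [List.getD_eq_getElem?_getD, List.getElem?_set]
  split
  · subst t
    by_cases h : j < p.length <;> simp [h]
  · rename_i h
    have hne' : ¬ t = j := fun hh => h hh.symm
    simp [hne']

theorem isPrimeAux_iff (m d : Nat) (hd : 0 < d) :
    pvIsPrimeAux m d = true ↔ ∀ e, d ≤ e → e * e ≤ m → ¬ e ∣ m := by
  induction d using pvIsPrimeAux.induct (m := m) with
  | case1 d h hmod =>
    rw [pvIsPrimeAux, dif_pos h, if_pos hmod]
    constructor
    · intro hfc; exact absurd hfc (by simp)
    · intro hall
      exact absurd ((Nat.dvd_of_mod_eq_zero (by simpa using hmod)))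
        (hall d le_rfl h.1)
  | case2 d h hmod ih =>
    rw [pvIsPrimeAux, dif_pos h, if_neg hmod]
    rw [ih (by omega)]
    constructor
    · intro hall e hde hem
      rcases Nat.lt_or_ge d e with hlt | hge
      · exact hall e hlt hem
      · have : e = d := le_antisymm hge hde
        subst this
        intro hdvd
        exact hmod (by simpa using (Nat.mod_eq_zero_of_dvd hdvd))
    · intro hall e hde hem
      exact hall e (le_of_lt hde) hem
  | case3 d h =>
    rw [pvIsPrimeAux, dif_neg h]
    simp only [true_iff]
    intro e hde hem hdvd
    have : d * d ≤ e * e := Nat.mul_le_mul hde hde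
    exact h ⟨le_trans this hem, hd⟩

theorem isPrime_iff (m : Nat) : pvIsPrime m = true ↔ Nat.Prime m := by
  unfold pvIsPrime
  split
  · rename_i h
    constructor
    · intro hf; exact absurd hf (by simp)
    · intro hp; exact absurd hp.two_le (by omega)
  · rename_i h
    rw [isPrimeAux_iff m 2 (by omega), Nat.prime_def_le_sqrt]
    constructor
    · intro hall; exact ⟨by omega, fun e he hsq => hall e he (Nat.le_sqrt.mp hsq)⟩
    · rintro ⟨-, hall⟩ e he hsq; exact hall e he (Nat.le_sqrt.mpr hsq)

theorem pvMark_length (n i : Nat) : ∀ (j : Nat) (p : List Int), (pvMark n i j p).length = p.length := by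
  intro j p
  induction j, p using pvMark.induct (n := n) (i := i) with
  | case1 j p h ih => rw [pvMark, dif_pos h, ih]; simp
  | case2 j p h => rw [pvMark, dif_neg h]

theorem pvMark_getD (n i : Nat) (hi : 0 < i) :
    ∀ (j : Nat) (p : List Int) (t : Nat), i ∣ j →
    (pvMark n i j p).getD t 0 =
      if i ∣ t ∧ j ≤ t ∧ t < n then 0 else p.getD t 0 := by
  intro j p
  induction j, p using pvMark.induct (n := n) (i := i) with
  | case1 j p h ih =>
    intro t hij
    rw [pvMark, dif_pos h]
    have hij' : i ∣ j + i := Dvd.dvd.add hij dvd_rfl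
    rw [ih t hij', getD_set_zero]
    by_cases hc : i ∣ t ∧ j ≤ t ∧ t < n
    · rw [if_pos hc]
      rcases hc with ⟨hit, hjt, htn⟩
      by_cases ht : t = j
      · subst ht
        rw [if_neg (by rintro ⟨-, hji, -⟩; omega), if_pos rfl]
      · have hjt' : j < t := lt_of_le_of_ne hjt (Ne.symm ht)
        have hdvd : i ∣ t - j := Nat.dvd_sub hit hij
        have hle : i ≤ t - j := Nat.le_of_dvd (by omega) hdvd
        rw [if_pos ⟨hit, by omega, htn⟩]
    · rw [if_neg hc]
      rw [if_neg (by rintro ⟨a, b, c⟩; exact hc ⟨a, by omega, c⟩)]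
      rw [if_neg (by rintro rfl; exact hc ⟨hij, le_rfl, h.1⟩)]
  | case2 j p h =>
    intro t hij
    rw [pvMark, dif_neg h]
    have hn : ¬ j < n := fun hj => h ⟨hj, hi⟩
    rw [if_neg (by rintro ⟨-, b, c⟩; omega)]

abbrev pvMarked (k t : Nat) : Prop := ∃ d < k, Nat.Prime d ∧ d ∣ t ∧ 2 * d ≤ t

theorem composite_small_prime (t : Nat) (h2 : 2 ≤ t) (hnp : ¬ Nat.Prime t) :
    ∃ d, Nat.Prime d ∧ d ∣ t ∧ 2 * d ≤ t ∧ d < t := by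
  have ht1 : t ≠ 1 := by omega
  have hp : Nat.Prime t.minFac := Nat.minFac_prime ht1
  have hd : t.minFac ∣ t := Nat.minFac_dvd t
  have hne : t.minFac ≠ t := fun he => hnp (he ▸ hp)
  rcases hd with ⟨m, hm⟩
  have hm0 : m ≠ 0 := by rintro rfl; simp at hm; omega
  have hm1 : m ≠ 1 := by rintro rfl; simp at hm; exact hne hm.symm
  have h2d : 2 * t.minFac ≤ t := by
    have h2m : 2 ≤ m := by omega
    calc 2 * t.minFac = t.minFac * 2 := by ring
    _ ≤ t.minFac * m := Nat.mul_le_mul_left _ h2m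
    _ = t := hm.symm
  exact ⟨t.minFac, hp, ⟨m, hm⟩, h2d, by have := hp.two_le; omega⟩

theorem not_marked_iff (k t : Nat) (h2 : 2 ≤ t) (htk : t ≤ k) :
    (¬ pvMarked k t) ↔ Nat.Prime t := by
  constructor
  · intro hnm
    by_contra hnp
    obtain ⟨d, hdp, hdv, h2d, hlt⟩ := composite_small_prime t h2 hnp
    exact hnm ⟨d, by omega, hdp, hdv, h2d⟩
  · rintro hp ⟨d, hdk, hdp, hdvd, h2d⟩
    rcases hp.eq_one_or_self_of_dvd d hdvd with rfl | rfl
    · exact absurd hdp.two_le (by omega)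
    · omega

theorem pvSieve_length (n : Nat) : ∀ (i : Nat) (p : List Int), (pvSieve n i p).length = p.length := by
  intro i p
  induction i, p using pvSieve.induct (n := n) with
  | case1 i p h ih =>
    rw [pvSieve, dif_pos h]
    by_cases hc : p.getD i 0 ≠ 0
    · rw [dif_pos hc] at ih
      rw [if_pos hc, ih, pvMark_length]
    · rw [dif_neg hc] at ih
      rw [if_neg hc]
      exact ih
  | case2 i p h => rw [pvSieve, dif_neg h]

theorem pvSieve_getD (n : Nat) : ∀ (k : Nat) (p : List Int), 2 ≤ k →
    p.length = n →
    (∀ t, t < n → p.getD t 0 = if 2 ≤ t ∧ ¬ pvMarked k t then 1 else 0) →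
    ∀ t, t < n → (pvSieve n k p).getD t 0 = if 2 ≤ t ∧ ¬ pvMarked n t then 1 else 0 := by
  intro k p
  induction k, p using pvSieve.induct (n := n) with
  | case1 k p h ih =>
    intro hk hlen hinv
    rw [pvSieve, dif_pos h]
    have hpk := hinv k h
    have hkk : (¬ pvMarked k k) ↔ Nat.Prime k := not_marked_iff k k hk le_rfl
    by_cases hkp : Nat.Prime k
    · have hne : p.getD k 0 ≠ 0 := by
        rw [hpk, if_pos ⟨hk, hkk.mpr hkp⟩]; decide
      rw [dif_pos hne] at ih
      rw [if_pos hne]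
      refine ih (by omega) (by rw [pvMark_length]; exact hlen) ?_
      intro t ht
      rw [pvMark_getD n k (by omega) (2 * k) p t ⟨2, by ring⟩]
      by_cases hmt : k ∣ t ∧ 2 * k ≤ t
      · rw [if_pos ⟨hmt.1, hmt.2, ht⟩]
        have hM : pvMarked (k + 1) t := ⟨k, by omega, hkp, hmt.1, hmt.2⟩
        rw [if_neg (by rintro ⟨-, hnm⟩; exact hnm hM)]
      · rw [if_neg (by rintro ⟨a, b, -⟩; exact hmt ⟨a, b⟩), hinv t ht]
        have heq : pvMarked (k + 1) t ↔ pvMarked k t := by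
          constructor
          · rintro ⟨d, hdk, hdp, hdv, h2d⟩
            rcases Nat.lt_or_ge d k with hlt | hge
            · exact ⟨d, hlt, hdp, hdv, h2d⟩
            · have hdk' : d = k := by omega
              subst hdk'
              exact absurd ⟨hdv, h2d⟩ hmt
          · rintro ⟨d, hdk, rest⟩
            exact ⟨d, by omega, rest⟩
        simp only [heq]
    · have h0 : p.getD k 0 = 0 := by
        rw [hpk, if_neg]
        rintro ⟨-, hnm⟩; exact hkp (hkk.mp hnm)
      have hne : ¬ (p.getD k 0 ≠ 0) := fun hx => hx h0
      rw [dif_neg hne] at ih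
      rw [if_neg hne]
      refine ih (by omega) hlen ?_
      intro t ht
      rw [hinv t ht]
      have heq : pvMarked (k + 1) t ↔ pvMarked k t := by
        constructor
        · rintro ⟨d, hdk, hdp, hdv, h2d⟩
          rcases Nat.lt_or_ge d k with hlt | hge
          · exact ⟨d, hlt, hdp, hdv, h2d⟩
          · have hdk' : d = k := by omega
            subst hdk'
            exact absurd hdp hkp
        · rintro ⟨d, hdk, rest⟩
          exact ⟨d, by omega, rest⟩
      simp only [heq]
  | case2 k p h =>
    intro hk hlen hinv t ht
    rw [pvSieve, dif_neg h]
    rw [hinv t ht]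
    have hnk : n ≤ k := by omega
    have heq : pvMarked k t ↔ pvMarked n t := by
      constructor
      · rintro ⟨d, hdk, hdp, hdv, h2d⟩
        exact ⟨d, by omega, hdp, hdv, h2d⟩
      · rintro ⟨d, hdn, hdp, hdv, h2d⟩
        exact ⟨d, by omega, hdp, hdv, h2d⟩
    simp only [heq]

theorem pvLike_length (p : List Int) : ∀ (a : List Int) (i : Nat), (pvLike p a i).length = a.length := by
  intro a i
  induction a, i using pvLike.induct (p := p) with
  | case1 a i h ih =>
    rw [pvLike, dif_pos h]
    by_cases hc : p.getD i 0 ≠ 0 ∧ p.getD ((i + 1) / 2) 0 ≠ 0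
    · rw [dif_pos hc] at ih
      rw [if_pos hc]
      exact ih
    · rw [dif_neg hc] at ih
      rw [if_neg hc, ih]
      simp
  | case2 a i h => rw [pvLike, dif_neg h]

theorem pvLike_getD (p : List Int) : ∀ (a : List Int) (i : Nat) (t : Nat), t < a.length →
    (pvLike p a i).getD t 0 =
      if t < i then a.getD t 0
      else if p.getD t 0 ≠ 0 ∧ p.getD ((t + 1) / 2) 0 ≠ 0 then a.getD t 0 else 0 := by
  intro a i
  induction a, i using pvLike.induct (p := p) with
  | case1 a i h ih =>
    intro t ht
    rw [pvLike, dif_pos h]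
    by_cases hc : p.getD i 0 ≠ 0 ∧ p.getD ((i + 1) / 2) 0 ≠ 0
    · rw [dif_pos hc] at ih
      rw [if_pos hc, ih t ht]
      by_cases h1 : t < i
      · rw [if_pos (by omega), if_pos h1]
      · by_cases h2 : t = i
        · subst h2
          rw [if_pos (by omega), if_neg h1, if_pos hc]
        · rw [if_neg (by omega), if_neg h1]
    · rw [dif_neg hc] at ih
      rw [if_neg hc, ih t (by simpa using ht)]
      rw [getD_set_zero]
      by_cases h1 : t < i
      · rw [if_pos (by omega), if_neg (by omega), if_pos h1]
      · by_cases h2 : t = i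
        · subst h2
          rw [if_pos (by omega), if_pos rfl, if_neg h1, if_neg hc]
        · rw [if_neg (by omega), if_neg h2, if_neg h1]
  | case2 a i h =>
    intro t ht
    rw [pvLike, dif_neg h]
    rw [if_pos (by omega)]

-- ===== VERDICT (by name: the statement is the Claim_ definition above) =====
theorem gen_2017_like_spec : Claim_equal_gen_2017_like := by
  intro limit _ hpre
  unfold Pre_gen_2017_like at hpre
  unfold Spec_gen_2017_like gen_2017_like gen_2017_like_alt
  set n := (limit + 1).toNat with hn
  have hn2 : 2 ≤ n := by omega
  set p0 := ((List.replicate n (1 : Int)).set 0 0).set 1 0 with hp0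
  have hlen0 : p0.length = n := by simp [hp0]
  have hinv0 : ∀ t, t < n → p0.getD t 0 = if 2 ≤ t ∧ ¬ pvMarked 2 t then 1 else 0 := by
    intro t ht
    have hM : ¬ pvMarked 2 t := by
      rintro ⟨d, hdk, hdp, -⟩; have := hdp.two_le; omega
    rw [hp0, getD_set_zero, getD_set_zero]
    rcases t with _ | _ | t
    · simp
    · simp
    · rw [if_neg (by omega), if_neg (by omega),
        List.getD_replicate _ (by simpa using ht), if_pos ⟨by omega, hM⟩]
  set ps := pvSieve n 2 p0 with hps
  have hlens : ps.length = n := by rw [hps, pvSieve_length, hlen0]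
  have hq : ∀ t, t < n → ps.getD t 0 = if Nat.Prime t then 1 else 0 := by
    intro t ht
    rw [hps, pvSieve_getD n 2 p0 le_rfl hlen0 hinv0 t ht]
    by_cases h2 : 2 ≤ t
    · have hiff := not_marked_iff n t h2 (le_of_lt ht)
      by_cases hp : Nat.Prime t
      · rw [if_pos ⟨h2, hiff.mpr hp⟩, if_pos hp]
      · rw [if_neg (by rintro ⟨-, hnm⟩; exact hp (hiff.mp hnm)),
          if_neg hp]
    · rw [if_neg (by rintro ⟨a, -⟩; exact h2 a),
        if_neg (fun hp => h2 hp.two_le)]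
  apply List.ext_getElem
  · rw [pvLike_length, hlens]
    simp
  · intro t h1 h2
    have hlt : t < n := by rw [pvLike_length, hlens] at h1; exact h1
    rw [← List.getD_eq_getElem _ 0 h1, ← List.getD_eq_getElem _ 0 h2]
    rw [pvLike_getD ps ps 0 t (by omega), if_neg (by omega)]
    have htar : (t + 1) / 2 < n := by omega
    rw [hq t hlt, hq _ htar]
    have hmap : ((List.range n).map
        (fun i => if pvIsPrime i && pvIsPrime ((i + 1) / 2) then (1 : Int) else 0)).getD t 0 =
        (if pvIsPrime t && pvIsPrime ((t + 1) / 2) then (1 : Int) else 0) := by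
      rw [List.getD_eq_getElem _ 0 (by simpa using hlt)]
      simp
    rw [hmap]
    have b1 := isPrime_iff t
    have b2 := isPrime_iff ((t + 1) / 2)
    by_cases hp1 : Nat.Prime t <;> by_cases hp2 : Nat.Prime ((t + 1) / 2) <;>
      simp [hp1, hp2] at b1 b2 <;> simp [hp1, hp2, b1, b2]
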